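-- pv_equiv track=rewrite | github.com/DMJester/PrivateStudy | Implementation/60059/programmers_60059.py | rotate_key
-- ===== SOURCE A (Python) =====
-- def rotate_key(key, m):
--     case_list = [[[0] * m for _ in range(m)] for _ in range(4)]
--
--     for angle in range(4):
--         for y in range(m):
--             for x in range(m):
--                 if angle == 0:
--                     case_list[angle][y][x] = key[y][x]
--                 elif angle == 1:
--                     case_list[angle][x][m-1-y] = key[y][x]
--                 elif angle == 2:
--                     case_list[angle][m-1-y][m-1-x] = key[y][x]
--                 elif angle == 3:
--                     case_list[angle][m-1-x][y] = key[y][x]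
--     return case_list
-- ===== SOURCE B (Python) =====
-- def rotate_key(key, m):
--     grid = [[key[y][x] for x in range(m)] for y in range(m)]
--     result = [grid]
--     for _ in range(3):
--         grid = [list(row) for row in zip(*grid[::-1])]
--         result.append(grid)
--     return result
-- ===== Notes on version B (the rewrite author's own statement) =====
-- stated objective: simpler
-- what changed: B copies the m-by-m submatrix of key once and derives each of the other three grids by applying one 90-degree rotation (reverse rows, then transpose via zip) to the previous grid, instead of A's single triple loop that places every cell of all four grids directly from key with per-angle index formulas.
import Mathlib
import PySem

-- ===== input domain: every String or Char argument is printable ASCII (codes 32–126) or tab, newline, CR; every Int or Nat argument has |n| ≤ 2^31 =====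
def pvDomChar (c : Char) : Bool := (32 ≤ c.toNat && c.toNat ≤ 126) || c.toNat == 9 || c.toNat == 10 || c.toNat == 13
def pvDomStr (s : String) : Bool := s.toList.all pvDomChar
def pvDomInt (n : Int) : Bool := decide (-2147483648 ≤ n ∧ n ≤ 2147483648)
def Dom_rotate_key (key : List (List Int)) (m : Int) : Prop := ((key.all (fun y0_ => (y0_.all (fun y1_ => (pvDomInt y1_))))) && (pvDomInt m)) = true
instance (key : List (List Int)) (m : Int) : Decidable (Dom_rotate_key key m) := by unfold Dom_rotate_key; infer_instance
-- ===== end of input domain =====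

-- B builds the first grid once and derives each further grid by one 90° rotation (reverse rows, then
-- collect columns) of the previous grid, instead of A's triple loop that places every cell of all four
-- grids directly from key with per-angle index formulas; same output, similar cost ("simpler").

-- ===== PORT A =====
-- key[y][x] (total form; out-of-range reads are excluded by Pre_)
def pvKeyAt (key : List (List Int)) (y x : Int) : Int :=
  PySem.List.pyGetD (PySem.List.pyGetD key y []) x 0

-- g[i][j] = v
def pvSet2 (g : List (List Int)) (i j : Int) (v : Int) : List (List Int) :=
  PySem.List.pySetD g i (PySem.List.pySetD (PySem.List.pyGetD g i []) j v)

-- case_list[a][i][j] = v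
def pvSet3 (cl : List (List (List Int))) (a i j : Int) (v : Int) : List (List (List Int)) :=
  PySem.List.pySetD cl a (pvSet2 (PySem.List.pyGetD cl a []) i j v)

def rotate_key (key : List (List Int)) (m : Int) : List (List (List Int)) :=
  let case_list := (List.range 4).map (fun _ => List.replicate m.toNat (List.replicate m.toNat (0 : Int)))
  (PySem.List.pyRange 0 4 1).foldl (fun cl angle =>
    (PySem.List.pyRange 0 m 1).foldl (fun cl y =>
      (PySem.List.pyRange 0 m 1).foldl (fun cl x =>
        if angle = 0 then pvSet3 cl angle y x (pvKeyAt key y x)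
        else if angle = 1 then pvSet3 cl angle x (m-1-y) (pvKeyAt key y x)
        else if angle = 2 then pvSet3 cl angle (m-1-y) (m-1-x) (pvKeyAt key y x)
        else if angle = 3 then pvSet3 cl angle (m-1-x) y (pvKeyAt key y x)
        else cl) cl) cl) case_list

-- ===== PORT B =====
-- zip(*rows): collect the heads of all rows, truncating at the shortest row (empty when no rows)
def pvZip (rows : List (List Int)) : List (List Int) :=
  if h : (rows.isEmpty || rows.any (fun r => r.isEmpty)) = true then []
  else (rows.map (fun r => r.headD 0)) :: pvZip (rows.map List.tail)
termination_by (rows.headD []).length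
decreasing_by
  simp only [Bool.or_eq_true, List.any_eq_true, not_or, not_exists, not_and] at h
  obtain ⟨h1, h2⟩ := h
  cases rows with
  | nil => simp at h1
  | cons r rest =>
    have hr : ¬ r.isEmpty = true := h2 r List.mem_cons_self
    cases r with
    | nil => simp at hr
    | cons a t => simp

def rotate_key_alt (key : List (List Int)) (m : Int) : List (List (List Int)) :=
  let grid := (PySem.List.pyRange 0 m 1).map (fun y =>
    (PySem.List.pyRange 0 m 1).map (fun x =>
      PySem.List.pyGetD (PySem.List.pyGetD key y []) x 0))
  ((List.range 3).foldl (fun (st : List (List (List Int)) × List (List Int)) _ =>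
      let g := pvZip st.2.reverse
      (st.1 ++ [g], g)) ([grid], grid)).1

-- ===== PRECONDITION & SPEC =====
-- Pre_ excludes exactly the inputs on which A raises IndexError reading key[y][x]:
-- m > 0 with fewer than m rows, or one of the first m rows shorter than m.
def Pre_rotate_key (key : List (List Int)) (m : Int) : Prop :=
  0 < m → ((m ≤ (key.length : Int)) ∧ ∀ row ∈ key.take m.toNat, m ≤ (row.length : Int))
instance (key : List (List Int)) (m : Int) : Decidable (Pre_rotate_key key m) := by
  unfold Pre_rotate_key; infer_instance

def pvWitness_rotate_key : List (List Int) × Int := ([[1, 2], [3, 4]], 2)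

def Spec_rotate_key (key : List (List Int)) (m : Int) (out : List (List (List Int))) : Prop := out = rotate_key_alt key m
instance (key : List (List Int)) (m : Int) (out : List (List (List Int))) : Decidable (Spec_rotate_key key m out) := by unfold Spec_rotate_key; infer_instance

-- ===== CLAIM (what is proved, stated in full; the proofs are below) =====
def Claim_equal_rotate_key : Prop := ∀ (key : List (List Int)) (m : Int), Dom_rotate_key key m → Pre_rotate_key key m → Spec_rotate_key key m (rotate_key key m)

-- ===== LEMMAS AND PROOFS =====

-- key[y][x] at Nat indices
def pvK (key : List (List Int)) (i j : Nat) : Int := (key.getD i []).getD j 0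

def pvEntry (g : List (List Int)) (i j : Nat) : Int := (g.getD i []).getD j 0

def pvMk (n : Nat) (f : Nat → Nat → Int) : List (List Int) :=
  (List.range n).map (fun i => (List.range n).map (f i))

def pvShape (n : Nat) (g : List (List Int)) : Prop :=
  g.length = n ∧ ∀ r ∈ g, r.length = n

def pvSet2n (g : List (List Int)) (i j : Nat) (v : Int) : List (List Int) :=
  g.set i ((g.getD i []).set j v)

def pvW (n : Nat) : List (Nat × Nat) :=
  (List.range n).flatMap (fun a => (List.range n).map (fun b => (a, b)))

lemma pvSet2_natCast (g : List (List Int)) (i j : Nat) (v : Int) :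
    pvSet2 g (i : Int) (j : Int) v = pvSet2n g i j v := by
  simp [pvSet2, pvSet2n]

lemma pvKeyAt_natCast (key : List (List Int)) (y x : Nat) :
    pvKeyAt key (y : Int) (x : Int) = pvK key y x := by
  simp [pvKeyAt, pvK]

lemma pvMk_shape (n : Nat) (f : Nat → Nat → Int) : pvShape n (pvMk n f) := by
  refine ⟨by simp [pvMk], ?_⟩
  intro r hr
  simp only [pvMk, List.mem_map] at hr
  obtain ⟨i, _, rfl⟩ := hr
  simp

lemma pvMk_congr {n : Nat} {f g : Nat → Nat → Int}
    (h : ∀ i j, i < n → j < n → f i j = g i j) : pvMk n f = pvMk n g := by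
  unfold pvMk
  refine List.map_congr_left ?_
  intro i hi
  rw [List.mem_range] at hi
  refine List.map_congr_left ?_
  intro j hj
  rw [List.mem_range] at hj
  exact h i j hi hj

lemma pv_shape_replicate (n : Nat) : pvShape n (List.replicate n (List.replicate n (0 : Int))) := by
  refine ⟨by simp, ?_⟩
  intro r hr
  rw [List.eq_of_mem_replicate hr]
  simp

lemma pv_eq_mk {n : Nat} {g : List (List Int)} {f : Nat → Nat → Int}
    (hs : pvShape n g) (he : ∀ i j, i < n → j < n → pvEntry g i j = f i j) :
    g = pvMk n f := by
  obtain ⟨hlen, hrow⟩ := hs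
  apply List.ext_getElem (by simp [pvMk, hlen])
  intro i h1 h2
  have hi : i < n := by rwa [hlen] at h1
  have hrl : g[i].length = n := hrow _ (List.getElem_mem h1)
  have hmk : (pvMk n f)[i]'h2 = (List.range n).map (f i) := by
    simp [pvMk]
  rw [hmk]
  apply List.ext_getElem (by simpa using hrl)
  intro j h3 h4
  have hj : j < n := by rwa [hrl] at h3
  have he' := he i j hi hj
  unfold pvEntry at he'
  rw [List.getD_eq_getElem g [] h1, List.getD_eq_getElem _ _ h3] at he'
  simp only [List.getElem_map, List.getElem_range]
  exact he'

lemma pvSet2n_shape {n : Nat} {g : List (List Int)} (hs : pvShape n g)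
    {i0 : Nat} (hi0 : i0 < n) (j0 : Nat) (v : Int) : pvShape n (pvSet2n g i0 j0 v) := by
  obtain ⟨hlen, hrow⟩ := hs
  refine ⟨by simp [pvSet2n, hlen], ?_⟩
  intro row hrw
  unfold pvSet2n at hrw
  rcases List.mem_or_eq_of_mem_set hrw with h | h
  · exact hrow _ h
  · subst h
    simp only [List.length_set]
    rw [List.getD_eq_getElem g [] (by rw [hlen]; exact hi0)]
    exact hrow _ (List.getElem_mem _)

lemma pvSet2n_entry {n : Nat} {g : List (List Int)} (hs : pvShape n g)
    {i0 j0 : Nat} (hi0 : i0 < n) (hj0 : j0 < n) (v : Int) {i j : Nat}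
    (hi : i < n) (hj : j < n) :
    pvEntry (pvSet2n g i0 j0 v) i j = if i = i0 ∧ j = j0 then v else pvEntry g i j := by
  obtain ⟨hlen, hrow⟩ := hs
  have hi0l : i0 < g.length := by rw [hlen]; exact hi0
  have hrl : (g.getD i0 []).length = n := by
    rw [List.getD_eq_getElem g [] hi0l]
    exact hrow _ (List.getElem_mem _)
  have hj0l : j0 < (g.getD i0 []).length := by rw [hrl]; exact hj0
  unfold pvEntry pvSet2n
  by_cases hii : i = i0
  · subst hii
    by_cases hjj : j = j0
    · subst hjj
      have hj0e : j < (g[i]'hi0l).length := by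
        rw [List.getD_eq_getElem g [] hi0l] at hj0l
        exact hj0l
      simp [List.getD_eq_getElem?_getD, List.getElem?_set, hi0l, hj0e]
    · simp [List.getD_eq_getElem?_getD, List.getElem?_set, hi0l, hjj, Ne.symm hjj]
  · simp [List.getD_eq_getElem?_getD, List.getElem?_set, hii, Ne.symm hii]

lemma pv_find_unique {β : Type} (P : List β) (pred : β → Bool) (p : β) :
    p ∈ P → pred p = true → (∀ q ∈ P, pred q = true → q = p) → P.find? pred = some p := by
  induction P with
  | nil => intro h; cases h
  | cons q Q ih =>
    intro hmem hp huniq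
    by_cases hq : pred q = true
    · have hqp : q = p := huniq q List.mem_cons_self hq
      subst hqp
      exact List.find?_cons_of_pos hq
    · have h1 : (q :: Q).find? pred = Q.find? pred := List.find?_cons_of_neg hq
      rw [h1]
      rcases List.mem_cons.mp hmem with rfl | hm
      · exact absurd hp hq
      · exact ih hm hp (fun s hs hps => huniq s (List.mem_cons_of_mem _ hs) hps)

lemma pv_foldl_writes (n : Nat) (r c : Nat → Nat → Nat) (v : Nat → Nat → Int) :
    ∀ (P : List (Nat × Nat)) (g : List (List Int)), pvShape n g →
    (∀ p ∈ P, r p.1 p.2 < n ∧ c p.1 p.2 < n) →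
    pvShape n (P.foldl (fun g p => pvSet2n g (r p.1 p.2) (c p.1 p.2) (v p.1 p.2)) g) ∧
    (List.Pairwise (fun p q => (r p.1 p.2, c p.1 p.2) ≠ (r q.1 q.2, c q.1 q.2)) P →
     ∀ i j, i < n → j < n →
       pvEntry (P.foldl (fun g p => pvSet2n g (r p.1 p.2) (c p.1 p.2) (v p.1 p.2)) g) i j =
         (match P.find? (fun p => r p.1 p.2 == i && c p.1 p.2 == j) with
          | some p => v p.1 p.2
          | none => pvEntry g i j)) := by
  intro P
  induction P with
  | nil =>
    intro g hs _
    exact ⟨hs, by intro _ i j _ _; simp⟩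
  | cons p0 P ih =>
    intro g hs hb
    have hb0 := hb p0 List.mem_cons_self
    have hbt : ∀ p ∈ P, r p.1 p.2 < n ∧ c p.1 p.2 < n := fun p hp => hb p (List.mem_cons_of_mem _ hp)
    have hs' : pvShape n (pvSet2n g (r p0.1 p0.2) (c p0.1 p0.2) (v p0.1 p0.2)) :=
      pvSet2n_shape hs hb0.1 _ _
    obtain ⟨ihs, ihe⟩ := ih (pvSet2n g (r p0.1 p0.2) (c p0.1 p0.2) (v p0.1 p0.2)) hs' hbt
    refine ⟨by simpa using ihs, ?_⟩
    intro hpw i j hi hj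
    rw [List.pairwise_cons] at hpw
    obtain ⟨hp0, hpt⟩ := hpw
    simp only [List.foldl_cons]
    rw [ihe hpt i j hi hj]
    by_cases hhit : r p0.1 p0.2 = i ∧ c p0.1 p0.2 = j
    · have hpred : (fun p : Nat × Nat => r p.1 p.2 == i && c p.1 p.2 == j) p0 = true := by
        simp [hhit.1, hhit.2]
      have hcons : List.find? (fun p : Nat × Nat => r p.1 p.2 == i && c p.1 p.2 == j) (p0 :: P)
          = some p0 := List.find?_cons_of_pos hpred
      rw [hcons]
      have hnone : P.find? (fun p : Nat × Nat => r p.1 p.2 == i && c p.1 p.2 == j) = none := by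
        rw [List.find?_eq_none]
        intro q hq
        have hne := hp0 q hq
        simp only [Bool.and_eq_true, beq_iff_eq, not_and]
        intro h1 h2
        exact hne (by rw [h1, h2, hhit.1, hhit.2])
      rw [hnone]
      rw [pvSet2n_entry hs hb0.1 hb0.2 (v p0.1 p0.2) hi hj]
      simp [hhit.1, hhit.2]
    · have hpred : ¬ ((fun p : Nat × Nat => r p.1 p.2 == i && c p.1 p.2 == j) p0 = true) := by
        simp only [Bool.and_eq_true, beq_iff_eq]
        exact hhit
      have hcons : List.find? (fun p : Nat × Nat => r p.1 p.2 == i && c p.1 p.2 == j) (p0 :: P)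
          = List.find? (fun p : Nat × Nat => r p.1 p.2 == i && c p.1 p.2 == j) P :=
        List.find?_cons_of_neg hpred
      rw [hcons]
      rw [pvSet2n_entry hs hb0.1 hb0.2 (v p0.1 p0.2) hi hj]
      have hne' : ¬ (i = r p0.1 p0.2 ∧ j = c p0.1 p0.2) := by
        rintro ⟨e1, e2⟩
        exact hhit ⟨e1.symm, e2.symm⟩
      simp [hne']

lemma pv_foldl_nest {α β γ : Type} (l : List α) (h : α → List β) (f : γ → α → β → γ) (init : γ) :
    l.foldl (fun acc y => (h y).foldl (fun acc x => f acc y x) acc) init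
      = (l.flatMap (fun y => (h y).map (fun x => (y, x)))).foldl (fun acc p => f acc p.1 p.2) init := by
  induction l generalizing init with
  | nil => simp
  | cons y l ih =>
    simp only [List.foldl_cons, List.flatMap_cons, List.foldl_append, List.foldl_map]
    exact ih _

lemma pv_mem_W (n : Nat) (p : Nat × Nat) : p ∈ pvW n ↔ p.1 < n ∧ p.2 < n := by
  rcases p with ⟨a, b⟩
  simp [pvW, List.mem_flatMap]

lemma pv_nodup_W (n : Nat) : (pvW n).Nodup := by
  have h : pvW n = (List.range n) ×ˢ (List.range n) := rfl
  rw [h]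
  exact List.Nodup.product List.nodup_range List.nodup_range

-- helpers about writing into a fixed slot of the outer list
lemma pv_setD_getD_self (cl : List (List (List Int))) (a : Int) (ha : 0 ≤ a)
    (ha2 : a.toNat < cl.length) :
    PySem.List.pySetD cl a (PySem.List.pyGetD cl a []) = cl := by
  have haa : a = ((a.toNat : Nat) : Int) := by omega
  rw [haa]
  simp only [PySem.List.pySetD_natCast, PySem.List.pyGetD_natCast]
  rw [List.getD_eq_getElem cl [] ha2]
  exact List.set_getElem_self ha2

lemma pv_getD_setD (cl : List (List (List Int))) (a : Int) (ha : 0 ≤ a)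
    (ha2 : a.toNat < cl.length) (x : List (List Int)) :
    PySem.List.pyGetD (PySem.List.pySetD cl a x) a [] = x := by
  have haa : a = ((a.toNat : Nat) : Int) := by omega
  rw [haa]
  simp only [PySem.List.pySetD_natCast, PySem.List.pyGetD_natCast]
  simp [List.getD_eq_getElem?_getD, List.getElem?_set, ha2]

lemma pv_setD_setD (cl : List (List (List Int))) (a : Int) (ha : 0 ≤ a)
    (x y : List (List Int)) :
    PySem.List.pySetD (PySem.List.pySetD cl a x) a y = PySem.List.pySetD cl a y := by
  have haa : a = ((a.toNat : Nat) : Int) := by omega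
  rw [haa]
  simp only [PySem.List.pySetD_natCast, PySem.List.pyGetD_natCast]
  exact List.set_set x

lemma pv_len_setD (cl : List (List (List Int))) (a : Int) (x : List (List Int)) :
    (PySem.List.pySetD cl a x).length = cl.length := by
  simp [PySem.List.length_pySetD]

lemma pv_foldl_set3 {β : Type} (a : Int) (ha : 0 ≤ a) (f : List (List Int) → β → List (List Int)) :
    ∀ (P : List β) (cl : List (List (List Int))), a.toNat < cl.length →
    P.foldl (fun cl p => PySem.List.pySetD cl a (f (PySem.List.pyGetD cl a []) p)) cl
      = PySem.List.pySetD cl a (P.foldl f (PySem.List.pyGetD cl a [])) := by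
  intro P
  induction P with
  | nil =>
    intro cl ha2
    exact (pv_setD_getD_self cl a ha ha2).symm
  | cons p P ih =>
    intro cl ha2
    simp only [List.foldl_cons]
    rw [ih _ (by rw [pv_len_setD]; exact ha2)]
    rw [pv_getD_setD cl a ha ha2, pv_setD_setD cl a ha]

lemma pv_double_set3 (a : Int) (ha : 0 ≤ a) (Y X : List Int) (iI jI v : Int → Int → Int) :
    ∀ (cl : List (List (List Int))), a.toNat < cl.length →
    Y.foldl (fun cl y => X.foldl (fun cl x => pvSet3 cl a (iI y x) (jI y x) (v y x)) cl) cl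
      = PySem.List.pySetD cl a
          (Y.foldl (fun g y => X.foldl (fun g x => pvSet2 g (iI y x) (jI y x) (v y x)) g)
            (PySem.List.pyGetD cl a [])) := by
  induction Y with
  | nil =>
    intro cl ha2
    exact (pv_setD_getD_self cl a ha ha2).symm
  | cons y Y ih =>
    intro cl ha2
    simp only [List.foldl_cons]
    have hx : X.foldl (fun cl x => pvSet3 cl a (iI y x) (jI y x) (v y x)) cl
        = PySem.List.pySetD cl a
            (X.foldl (fun g x => pvSet2 g (iI y x) (jI y x) (v y x)) (PySem.List.pyGetD cl a [])) := by
      have h := pv_foldl_set3 a ha (fun g x => pvSet2 g (iI y x) (jI y x) (v y x)) X cl ha2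
      simpa [pvSet3] using h
    rw [hx, ih _ (by rw [pv_len_setD]; exact ha2)]
    rw [pv_getD_setD cl a ha ha2, pv_setD_setD cl a ha]

lemma pv_cast_pairs (m : Int) : ∀ (L : List Nat),
    (L.map (fun nn : Nat => (nn : Int))).flatMap
      (fun y => (((List.range m.toNat).map (fun nn : Nat => (nn : Int))).map (fun x => (y, x))))
      = (L.flatMap (fun a => (List.range m.toNat).map (fun b => (a, b)))).map
          (fun p : Nat × Nat => ((p.1 : Int), (p.2 : Int))) := by
  intro L
  induction L with
  | nil => rfl
  | cons a L ih =>
    simp only [List.map_cons, List.flatMap_cons, List.map_append]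
    rw [ih]
    refine congrArg₂ (· ++ ·) ?_ rfl
    apply List.ext_getElem (by simp)
    intro k h1 h2
    simp

lemma pv_angle_grid (key : List (List Int)) (m : Int)
    (iI jI : Int → Int → Int) (r c : Nat → Nat → Nat) (f : Nat → Nat → Int)
    (hcompat : ∀ y x : Nat, y < m.toNat → x < m.toNat →
      iI (y : Int) (x : Int) = ((r y x : Nat) : Int) ∧ jI (y : Int) (x : Int) = ((c y x : Nat) : Int))
    (hb : ∀ y x : Nat, y < m.toNat → x < m.toNat → r y x < m.toNat ∧ c y x < m.toNat)
    (hinj : ∀ y x y' x' : Nat, y < m.toNat → x < m.toNat → y' < m.toNat → x' < m.toNat →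
      r y x = r y' x' → c y x = c y' x' → y = y' ∧ x = x')
    (hcover : ∀ i j : Nat, i < m.toNat → j < m.toNat →
      ∃ y x : Nat, y < m.toNat ∧ x < m.toNat ∧ r y x = i ∧ c y x = j ∧ f i j = pvK key y x) :
    (PySem.List.pyRange 0 m 1).foldl (fun g y =>
      (PySem.List.pyRange 0 m 1).foldl (fun g x =>
        pvSet2 g (iI y x) (jI y x) (pvKeyAt key y x)) g)
      (List.replicate m.toNat (List.replicate m.toNat (0 : Int)))
    = pvMk m.toNat f := by
  have hY : PySem.List.pyRange 0 m 1 = (List.range m.toNat).map (fun nn : Nat => (nn : Int)) := by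
    rw [PySem.List.pyRange_one, show m - 0 = m from by ring]
    exact List.map_congr_left (fun k _ => by omega)
  rw [hY]
  rw [pv_foldl_nest ((List.range m.toNat).map (fun nn : Nat => (nn : Int)))
      (fun _ => (List.range m.toNat).map (fun nn : Nat => (nn : Int)))
      (fun g a b => pvSet2 g (iI a b) (jI a b) (pvKeyAt key a b))]
  have hW : ((List.range m.toNat).map (fun nn : Nat => (nn : Int))).flatMap
      (fun y => (((List.range m.toNat).map (fun nn : Nat => (nn : Int))).map (fun x => (y, x))))
      = (pvW m.toNat).map (fun p : Nat × Nat => ((p.1 : Int), (p.2 : Int))) := by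
    unfold pvW
    exact pv_cast_pairs m (List.range m.toNat)
  rw [hW, List.foldl_map]
  have hstep : ∀ (g : List (List Int)), ∀ p ∈ pvW m.toNat,
      pvSet2 g (iI (((p.1 : Nat) : Int), ((p.2 : Nat) : Int)).1 (((p.1 : Nat) : Int), ((p.2 : Nat) : Int)).2)
          (jI (((p.1 : Nat) : Int), ((p.2 : Nat) : Int)).1 (((p.1 : Nat) : Int), ((p.2 : Nat) : Int)).2)
          (pvKeyAt key (((p.1 : Nat) : Int), ((p.2 : Nat) : Int)).1 (((p.1 : Nat) : Int), ((p.2 : Nat) : Int)).2)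
        = pvSet2n g (r p.1 p.2) (c p.1 p.2) (pvK key p.1 p.2) := by
    intro g p hp
    obtain ⟨h1, h2⟩ := (pv_mem_W m.toNat p).mp hp
    obtain ⟨hc1, hc2⟩ := hcompat p.1 p.2 h1 h2
    show pvSet2 g (iI (p.1 : Int) (p.2 : Int)) (jI (p.1 : Int) (p.2 : Int)) (pvKeyAt key (p.1 : Int) (p.2 : Int))
        = pvSet2n g (r p.1 p.2) (c p.1 p.2) (pvK key p.1 p.2)
    rw [hc1, hc2, pvSet2_natCast, pvKeyAt_natCast]
  rw [PySem.List.foldl_congr_mem _ _ _ _ hstep]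
  have hbW : ∀ p ∈ pvW m.toNat, r p.1 p.2 < m.toNat ∧ c p.1 p.2 < m.toNat := by
    intro p hp
    obtain ⟨h1, h2⟩ := (pv_mem_W m.toNat p).mp hp
    exact hb p.1 p.2 h1 h2
  obtain ⟨ihs, ihe⟩ := pv_foldl_writes m.toNat r c (pvK key)
      (pvW m.toNat) (List.replicate m.toNat (List.replicate m.toNat 0))
      (pv_shape_replicate m.toNat) hbW
  have hpair : List.Pairwise (fun p q : Nat × Nat =>
      (r p.1 p.2, c p.1 p.2) ≠ (r q.1 q.2, c q.1 q.2)) (pvW m.toNat) := by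
    refine List.Pairwise.imp_of_mem ?_ (pv_nodup_W m.toNat)
    intro a b ha hb' hne heq
    obtain ⟨ha1, ha2⟩ := (pv_mem_W m.toNat a).mp ha
    obtain ⟨hb1, hb2⟩ := (pv_mem_W m.toNat b).mp hb'
    obtain ⟨e1, e2⟩ := hinj a.1 a.2 b.1 b.2 ha1 ha2 hb1 hb2
      (congrArg Prod.fst heq) (congrArg Prod.snd heq)
    apply hne
    obtain ⟨x1, x2⟩ := a
    obtain ⟨y1, y2⟩ := b
    simp only [Prod.mk.injEq]
    exact ⟨e1, e2⟩
  apply pv_eq_mk ihs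
  intro i j hi hj
  have he := ihe hpair i j hi hj
  refine he.trans ?_
  obtain ⟨y, x, hy, hx, hr, hc, hf⟩ := hcover i j hi hj
  have hfind : (pvW m.toNat).find? (fun p : Nat × Nat =>
      r p.1 p.2 == i && c p.1 p.2 == j) = some (y, x) := by
    apply pv_find_unique _ _ (y, x) ((pv_mem_W m.toNat (y, x)).mpr ⟨hy, hx⟩)
    · simp [hr, hc]
    · intro q hq hpq
      obtain ⟨hq1, hq2⟩ := (pv_mem_W m.toNat q).mp hq
      simp only [Bool.and_eq_true, beq_iff_eq] at hpq
      obtain ⟨e1, e2⟩ := hinj q.1 q.2 y x hq1 hq2 hy hx (hpq.1.trans hr.symm) (hpq.2.trans hc.symm)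
      obtain ⟨q1, q2⟩ := q
      simp only [Prod.mk.injEq]
      exact ⟨e1, e2⟩
  rw [hfind, hf]

-- B-side: pvZip on uniform rows is the transpose
lemma pv_getD_zero (r : List Int) : r.getD 0 0 = r.headD 0 := by
  cases r <;> simp

lemma pv_getD_tail (r : List Int) (j : Nat) : r.tail.getD j 0 = r.getD (j + 1) 0 := by
  cases r <;> simp

lemma pvZip_spec : ∀ (n : Nat) (rows : List (List Int)), rows ≠ [] →
    (∀ r ∈ rows, r.length = n) →
    pvZip rows = (List.range n).map (fun j => rows.map (fun r => r.getD j 0)) := by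
  intro n
  induction n with
  | zero =>
    intro rows hne hlen
    rw [pvZip, dif_pos ?_]
    · simp
    · rcases rows with _ | ⟨r, rest⟩
      · exact absurd rfl hne
      · have h0 := hlen r List.mem_cons_self
        have hr : r = [] := List.eq_nil_of_length_eq_zero h0
        simp [hr]
  | succ n ih =>
    intro rows hne hlen
    rw [pvZip, dif_neg ?_]
    · have htne : rows.map List.tail ≠ [] := by
        simpa using hne
      have htlen : ∀ r ∈ rows.map List.tail, r.length = n := by
        intro r hr
        obtain ⟨s, hs, rfl⟩ := List.mem_map.mp hr
        have := hlen s hs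
        simp [List.length_tail, this]
      rw [ih _ htne htlen]
      rw [List.range_succ_eq_map]
      simp only [List.map_cons, List.map_map]
      refine congrArg₂ List.cons ?_ ?_
      · refine List.map_congr_left ?_
        intro r _
        exact (pv_getD_zero r).symm
      · refine List.map_congr_left ?_
        intro j _
        simp only [Function.comp_apply, List.map_map]
        refine List.map_congr_left ?_
        intro r _
        simp only [Function.comp_apply]
        exact pv_getD_tail r j
    · simp only [Bool.or_eq_true, List.any_eq_true, not_or, not_exists]
      constructor
      · simpa [List.isEmpty_iff] using hne
      · intro r
        rw [not_and]
        intro hr hre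
        have h1 := hlen r hr
        have h2 : r = [] := by simpa [List.isEmpty_iff] using hre
        rw [h2] at h1
        simp at h1

lemma pv_range_reverse (n : Nat) :
    (List.range n).reverse = (List.range n).map (fun k => n - 1 - k) := by
  apply List.ext_getElem (by simp)
  intro i h1 h2
  simp [List.getElem_reverse]

lemma pv_rot_mk (n : Nat) (f : Nat → Nat → Int) :
    pvZip ((pvMk n f).reverse) = pvMk n (fun i j => f (n - 1 - j) i) := by
  rcases Nat.eq_zero_or_pos n with rfl | hn
  · rw [show pvMk 0 f = [] from rfl]
    rw [show ([] : List (List Int)).reverse = [] from rfl]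
    rw [pvZip]
    simp [pvMk]
  · have hne : (pvMk n f).reverse ≠ [] := by
      simp only [ne_eq, List.reverse_eq_nil_iff]
      intro h
      have := congrArg List.length h
      simp [pvMk] at this
      omega
    have hlen : ∀ r ∈ (pvMk n f).reverse, r.length = n := by
      intro r hr
      rw [List.mem_reverse] at hr
      exact (pvMk_shape n f).2 r hr
    rw [pvZip_spec n _ hne hlen]
    have hrev : (pvMk n f).reverse = ((List.range n).map (fun k => n - 1 - k)).map
        (fun i => (List.range n).map (f i)) := by
      unfold pvMk
      rw [← pv_range_reverse, List.map_reverse]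
    rw [hrev]
    unfold pvMk
    refine List.map_congr_left ?_
    intro j hj
    rw [List.mem_range] at hj
    rw [List.map_map, List.map_map]
    refine List.map_congr_left ?_
    intro k _
    simp only [Function.comp_apply]
    rw [List.getD_eq_getElem _ _ (by simpa using hj)]
    simp

-- ===== VERDICT (by name: the statement is the Claim_ definition above) =====
theorem rotate_key_spec : Claim_equal_rotate_key := by
  intro key m _ _
  unfold Spec_rotate_key
  have hg : (PySem.List.pyRange 0 m 1).map (fun y => (PySem.List.pyRange 0 m 1).map (fun x =>
      PySem.List.pyGetD (PySem.List.pyGetD key y []) x 0))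
      = pvMk m.toNat (fun i j => pvK key i j) := by
    have hY : PySem.List.pyRange 0 m 1 = (List.range m.toNat).map (fun nn : Nat => (nn : Int)) := by
      rw [PySem.List.pyRange_one, show m - 0 = m from by ring]
      exact List.map_congr_left (fun k _ => by omega)
    rw [hY]
    unfold pvMk pvK
    rw [List.map_map]
    refine List.map_congr_left ?_
    intro i _
    simp only [Function.comp_apply]
    rw [List.map_map]
    refine List.map_congr_left ?_
    intro j _
    simp only [Function.comp_apply]
    simp
  have hB : rotate_key_alt key m = [(pvMk m.toNat (fun i j => pvK key i j)), (pvMk m.toNat (fun i j => pvK key (m.toNat - 1 - j) i)), (pvMk m.toNat (fun i j => pvK key (m.toNat - 1 - i) (m.toNat - 1 - j))), (pvMk m.toNat (fun i j => pvK key j (m.toNat - 1 - i)))] := by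
    unfold rotate_key_alt
    simp only [hg, show List.range 3 = [0, 1, 2] from rfl, List.foldl_cons, List.foldl_nil,
      List.cons_append, List.nil_append]
    rw [pv_rot_mk, pv_rot_mk, pv_rot_mk]
    refine congrArg₂ List.cons rfl ?_
    refine congrArg₂ List.cons rfl ?_
    refine congrArg₂ List.cons rfl ?_
    refine congrArg₂ List.cons ?_ rfl
    refine Eq.trans ?_ (?_ : pvMk m.toNat (fun i j => pvK key (m.toNat - 1 - (m.toNat - 1 - j)) (m.toNat - 1 - i)) = (pvMk m.toNat (fun i j => pvK key j (m.toNat - 1 - i))))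
    · rfl
    · apply pvMk_congr
      intro i j hi hj
      have hjj : m.toNat - 1 - (m.toNat - 1 - j) = j := by omega
      rw [hjj]
  have hA : rotate_key key m = [(pvMk m.toNat (fun i j => pvK key i j)), (pvMk m.toNat (fun i j => pvK key (m.toNat - 1 - j) i)), (pvMk m.toNat (fun i j => pvK key (m.toNat - 1 - i) (m.toNat - 1 - j))), (pvMk m.toNat (fun i j => pvK key j (m.toNat - 1 - i)))] := by
    unfold rotate_key
    simp only [show PySem.List.pyRange 0 4 1 = [(0 : Int), 1, 2, 3] from rfl,
      show List.range 4 = [0, 1, 2, 3] from rfl, List.map_cons, List.map_nil,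
      List.foldl_cons, List.foldl_nil,
      show ((1 : Int) = 0) = False from by norm_num,
      show ((2 : Int) = 0) = False from by norm_num, show ((2 : Int) = 1) = False from by norm_num,
      show ((3 : Int) = 0) = False from by norm_num, show ((3 : Int) = 1) = False from by norm_num,
      show ((3 : Int) = 2) = False from by norm_num,
      if_true, if_false]
    -- angle 0
    rw [pv_double_set3 0 (by norm_num) (PySem.List.pyRange 0 m 1) (PySem.List.pyRange 0 m 1) (fun y x => y) (fun y x => x)
      (fun y x => pvKeyAt key y x) [(List.replicate m.toNat (List.replicate m.toNat (0 : Int))), (List.replicate m.toNat (List.replicate m.toNat (0 : Int))), (List.replicate m.toNat (List.replicate m.toNat (0 : Int))), (List.replicate m.toNat (List.replicate m.toNat (0 : Int)))] (by norm_num)]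
    rw [show PySem.List.pyGetD [(List.replicate m.toNat (List.replicate m.toNat (0 : Int))), (List.replicate m.toNat (List.replicate m.toNat (0 : Int))), (List.replicate m.toNat (List.replicate m.toNat (0 : Int))), (List.replicate m.toNat (List.replicate m.toNat (0 : Int)))] (0 : Int) [] = (List.replicate m.toNat (List.replicate m.toNat (0 : Int))) from rfl]
    rw [pv_angle_grid key m (fun y x => y) (fun y x => x) (fun y x => y) (fun y x => x)
      (fun i j => pvK key i j)
      (by intro y x hy hx; exact ⟨rfl, rfl⟩)
      (by intro y x hy hx; exact ⟨hy, hx⟩)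
      (by intro y x y' x' hy hx hy' hx' e1 e2; exact ⟨e1, e2⟩)
      (by intro i j hi hj; exact ⟨i, j, hi, hj, rfl, rfl, rfl⟩)]
    rw [show PySem.List.pySetD [(List.replicate m.toNat (List.replicate m.toNat (0 : Int))), (List.replicate m.toNat (List.replicate m.toNat (0 : Int))), (List.replicate m.toNat (List.replicate m.toNat (0 : Int))), (List.replicate m.toNat (List.replicate m.toNat (0 : Int)))] (0 : Int) (pvMk m.toNat (fun i j => pvK key i j)) = [(pvMk m.toNat (fun i j => pvK key i j)), (List.replicate m.toNat (List.replicate m.toNat (0 : Int))), (List.replicate m.toNat (List.replicate m.toNat (0 : Int))), (List.replicate m.toNat (List.replicate m.toNat (0 : Int)))] from rfl]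
    -- angle 1
    rw [pv_double_set3 1 (by norm_num) (PySem.List.pyRange 0 m 1) (PySem.List.pyRange 0 m 1) (fun y x => x) (fun y x => m - 1 - y)
      (fun y x => pvKeyAt key y x) [(pvMk m.toNat (fun i j => pvK key i j)), (List.replicate m.toNat (List.replicate m.toNat (0 : Int))), (List.replicate m.toNat (List.replicate m.toNat (0 : Int))), (List.replicate m.toNat (List.replicate m.toNat (0 : Int)))] (by norm_num)]
    rw [show PySem.List.pyGetD [(pvMk m.toNat (fun i j => pvK key i j)), (List.replicate m.toNat (List.replicate m.toNat (0 : Int))), (List.replicate m.toNat (List.replicate m.toNat (0 : Int))), (List.replicate m.toNat (List.replicate m.toNat (0 : Int)))] (1 : Int) [] = (List.replicate m.toNat (List.replicate m.toNat (0 : Int))) from rfl]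
    rw [pv_angle_grid key m (fun y x => x) (fun y x => m - 1 - y) (fun y x => x)
      (fun y x => m.toNat - 1 - y) (fun i j => pvK key (m.toNat - 1 - j) i)
      (by intro y x hy hx
          refine ⟨rfl, ?_⟩
          show m - 1 - (y : Int) = ((m.toNat - 1 - y : Nat) : Int)
          omega)
      (by intro y x hy hx
          refine ⟨hx, ?_⟩
          show m.toNat - 1 - y < m.toNat
          omega)
      (by intro y x y' x' hy hx hy' hx' e1 e2
          have e1' : x = x' := e1
          have e2' : m.toNat - 1 - y = m.toNat - 1 - y' := e2
          exact ⟨by omega, e1'⟩)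
      (by intro i j hi hj
          refine ⟨m.toNat - 1 - j, i, by omega, hi, rfl, ?_, rfl⟩
          show m.toNat - 1 - (m.toNat - 1 - j) = j
          omega)]
    rw [show PySem.List.pySetD [(pvMk m.toNat (fun i j => pvK key i j)), (List.replicate m.toNat (List.replicate m.toNat (0 : Int))), (List.replicate m.toNat (List.replicate m.toNat (0 : Int))), (List.replicate m.toNat (List.replicate m.toNat (0 : Int)))] (1 : Int) (pvMk m.toNat (fun i j => pvK key (m.toNat - 1 - j) i)) = [(pvMk m.toNat (fun i j => pvK key i j)), (pvMk m.toNat (fun i j => pvK key (m.toNat - 1 - j) i)), (List.replicate m.toNat (List.replicate m.toNat (0 : Int))), (List.replicate m.toNat (List.replicate m.toNat (0 : Int)))] from rfl]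
    -- angle 2
    rw [pv_double_set3 2 (by norm_num) (PySem.List.pyRange 0 m 1) (PySem.List.pyRange 0 m 1) (fun y x => m - 1 - y) (fun y x => m - 1 - x)
      (fun y x => pvKeyAt key y x) [(pvMk m.toNat (fun i j => pvK key i j)), (pvMk m.toNat (fun i j => pvK key (m.toNat - 1 - j) i)), (List.replicate m.toNat (List.replicate m.toNat (0 : Int))), (List.replicate m.toNat (List.replicate m.toNat (0 : Int)))] (by norm_num)]
    rw [show PySem.List.pyGetD [(pvMk m.toNat (fun i j => pvK key i j)), (pvMk m.toNat (fun i j => pvK key (m.toNat - 1 - j) i)), (List.replicate m.toNat (List.replicate m.toNat (0 : Int))), (List.replicate m.toNat (List.replicate m.toNat (0 : Int)))] (2 : Int) [] = (List.replicate m.toNat (List.replicate m.toNat (0 : Int))) from rfl]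
    rw [pv_angle_grid key m (fun y x => m - 1 - y) (fun y x => m - 1 - x)
      (fun y x => m.toNat - 1 - y) (fun y x => m.toNat - 1 - x)
      (fun i j => pvK key (m.toNat - 1 - i) (m.toNat - 1 - j))
      (by intro y x hy hx
          constructor
          · show m - 1 - (y : Int) = ((m.toNat - 1 - y : Nat) : Int)
            omega
          · show m - 1 - (x : Int) = ((m.toNat - 1 - x : Nat) : Int)
            omega)
      (by intro y x hy hx
          constructor
          · show m.toNat - 1 - y < m.toNat
            omega
          · show m.toNat - 1 - x < m.toNat
            omega)
      (by intro y x y' x' hy hx hy' hx' e1 e2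
          have e1' : m.toNat - 1 - y = m.toNat - 1 - y' := e1
          have e2' : m.toNat - 1 - x = m.toNat - 1 - x' := e2
          exact ⟨by omega, by omega⟩)
      (by intro i j hi hj
          refine ⟨m.toNat - 1 - i, m.toNat - 1 - j, by omega, by omega, ?_, ?_, rfl⟩
          · show m.toNat - 1 - (m.toNat - 1 - i) = i
            omega
          · show m.toNat - 1 - (m.toNat - 1 - j) = j
            omega)]
    rw [show PySem.List.pySetD [(pvMk m.toNat (fun i j => pvK key i j)), (pvMk m.toNat (fun i j => pvK key (m.toNat - 1 - j) i)), (List.replicate m.toNat (List.replicate m.toNat (0 : Int))), (List.replicate m.toNat (List.replicate m.toNat (0 : Int)))] (2 : Int) (pvMk m.toNat (fun i j => pvK key (m.toNat - 1 - i) (m.toNat - 1 - j))) = [(pvMk m.toNat (fun i j => pvK key i j)), (pvMk m.toNat (fun i j => pvK key (m.toNat - 1 - j) i)), (pvMk m.toNat (fun i j => pvK key (m.toNat - 1 - i) (m.toNat - 1 - j))), (List.replicate m.toNat (List.replicate m.toNat (0 : Int)))] from rfl]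
    -- angle 3
    rw [pv_double_set3 3 (by norm_num) (PySem.List.pyRange 0 m 1) (PySem.List.pyRange 0 m 1) (fun y x => m - 1 - x) (fun y x => y)
      (fun y x => pvKeyAt key y x) [(pvMk m.toNat (fun i j => pvK key i j)), (pvMk m.toNat (fun i j => pvK key (m.toNat - 1 - j) i)), (pvMk m.toNat (fun i j => pvK key (m.toNat - 1 - i) (m.toNat - 1 - j))), (List.replicate m.toNat (List.replicate m.toNat (0 : Int)))] (by norm_num)]
    rw [show PySem.List.pyGetD [(pvMk m.toNat (fun i j => pvK key i j)), (pvMk m.toNat (fun i j => pvK key (m.toNat - 1 - j) i)), (pvMk m.toNat (fun i j => pvK key (m.toNat - 1 - i) (m.toNat - 1 - j))), (List.replicate m.toNat (List.replicate m.toNat (0 : Int)))] (3 : Int) [] = (List.replicate m.toNat (List.replicate m.toNat (0 : Int))) from rfl]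
    rw [pv_angle_grid key m (fun y x => m - 1 - x) (fun y x => y)
      (fun y x => m.toNat - 1 - x) (fun y x => y) (fun i j => pvK key j (m.toNat - 1 - i))
      (by intro y x hy hx
          refine ⟨?_, rfl⟩
          show m - 1 - (x : Int) = ((m.toNat - 1 - x : Nat) : Int)
          omega)
      (by intro y x hy hx
          refine ⟨?_, hy⟩
          show m.toNat - 1 - x < m.toNat
          omega)
      (by intro y x y' x' hy hx hy' hx' e1 e2
          have e1' : m.toNat - 1 - x = m.toNat - 1 - x' := e1
          have e2' : y = y' := e2
          exact ⟨e2', by omega⟩)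
      (by intro i j hi hj
          refine ⟨j, m.toNat - 1 - i, hj, by omega, ?_, rfl, rfl⟩
          show m.toNat - 1 - (m.toNat - 1 - i) = i
          omega)]
    rw [show PySem.List.pySetD [(pvMk m.toNat (fun i j => pvK key i j)), (pvMk m.toNat (fun i j => pvK key (m.toNat - 1 - j) i)), (pvMk m.toNat (fun i j => pvK key (m.toNat - 1 - i) (m.toNat - 1 - j))), (List.replicate m.toNat (List.replicate m.toNat (0 : Int)))] (3 : Int) (pvMk m.toNat (fun i j => pvK key j (m.toNat - 1 - i))) = [(pvMk m.toNat (fun i j => pvK key i j)), (pvMk m.toNat (fun i j => pvK key (m.toNat - 1 - j) i)), (pvMk m.toNat (fun i j => pvK key (m.toNat - 1 - i) (m.toNat - 1 - j))), (pvMk m.toNat (fun i j => pvK key j (m.toNat - 1 - i)))] from rfl]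
  rw [hA, hB]
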